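-- pv_equiv track=rewrite | github.com/hhhback/paper | experiments/constructors/ours.py | _depth_first_paths
-- ===== SOURCE A (Python) =====
-- def _depth_first_paths(notes: dict[str, object]) -> list[str]:
--     """Return note paths in hierarchy depth-first order.
--
--     Builds a tree from path segments and traverses depth-first,
--     sorting children alphabetically at each level.
--     """
--     tree: dict = {}
--     for path in notes:
--         segments = [s.strip() for s in path.split(" > ") if s.strip()]
--         node = tree
--         for seg in segments:
--             node = node.setdefault(seg, {})
--
--     result: list[str] = []
--
--     def _walk(node: dict, prefix: list[str]) -> None:
--         path_str = " > ".join(prefix)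
--         if path_str in notes:
--             result.append(path_str)
--         for child_name in sorted(node.keys()):
--             _walk(node[child_name], prefix + [child_name])
--
--     for root_name in sorted(tree.keys()):
--         _walk(tree[root_name], [root_name])
--
--     return result
-- ===== SOURCE B (Python) =====
-- def _depth_first_paths(notes: dict[str, object]) -> list[str]:
--     """Return note paths in hierarchy depth-first order.
--
--     No tree, no recursion: collect every nonempty normalized segment
--     prefix that names a real note, then sort the prefix tuples
--     lexicographically (= DFS pre-order with alphabetical children).
--     """
--     prefixes = set()
--     for path in notes:
--         segments = [s.strip() for s in path.split(" > ") if s.strip()]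
--         for i in range(1, len(segments) + 1):
--             p = tuple(segments[:i])
--             if " > ".join(p) in notes:
--                 prefixes.add(p)
--     return [" > ".join(p) for p in sorted(prefixes)]
-- ===== Notes on version B (the rewrite author's own statement) =====
-- stated objective: simpler
-- what changed: Replaces A's nested-dict trie construction plus recursive sorted DFS walk with a flat one: collect the set of nonempty normalized segment-prefix tuples that name a real note and sort them lexicographically, which reproduces DFS pre-order with alphabetically sorted children.
import Mathlib
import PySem

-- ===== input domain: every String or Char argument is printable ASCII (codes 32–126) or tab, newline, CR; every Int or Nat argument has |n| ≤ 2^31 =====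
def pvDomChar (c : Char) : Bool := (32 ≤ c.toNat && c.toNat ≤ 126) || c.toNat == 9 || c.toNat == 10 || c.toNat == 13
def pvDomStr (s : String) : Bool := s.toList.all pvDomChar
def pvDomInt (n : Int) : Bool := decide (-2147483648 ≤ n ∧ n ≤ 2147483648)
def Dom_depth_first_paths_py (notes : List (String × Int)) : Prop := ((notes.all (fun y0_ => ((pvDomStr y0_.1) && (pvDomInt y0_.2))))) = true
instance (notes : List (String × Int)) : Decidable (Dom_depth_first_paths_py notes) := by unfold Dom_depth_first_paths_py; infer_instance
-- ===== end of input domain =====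

-- B replaces A's trie build + recursive DFS by sorting the normalized prefix tuples lexicographically (same values; objective: simpler).

-- ===== PORT A =====
-- [s.strip() for s in path.split(" > ") if s.strip()]  (shared by both Pythons verbatim)
def segsOf (path : String) : List String :=
  (((PySem.Str.split? path " > ").getD []).filter (fun s => PySem.Str.strip s != "")).map PySem.Str.strip

-- Python's nested dict-of-dicts tree (explicit child list to avoid a nested inductive)
mutual
inductive Trie : Type where
  | mk : TrieL → Trie
inductive TrieL : Type where
  | nil : TrieL
  | cons : String → Trie → TrieL → TrieL
end

def Trie.children : Trie → TrieL
  | .mk ch => ch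

def TrieL.toList : TrieL → List (String × Trie)
  | .nil => []
  | .cons k t ch => (k, t) :: ch.toList

-- node.setdefault(seg, {}) then continue with the child: update/extend the child list at key s
def setWith : TrieL → String → (Option Trie → Trie) → TrieL
  | .nil, s, f => .cons s (f none) .nil
  | .cons k t ch, s, f => if k = s then .cons k (f (some t)) ch else .cons k t (setWith ch s f)

-- 'node = tree; for seg in segments: node = node.setdefault(seg, {})'
def trieInsert : Trie → List String → Trie
  | t, [] => t
  | .mk ch, s :: rest => .mk (setWith ch s (fun o => trieInsert (o.getD (.mk .nil)) rest))
termination_by _ segs => segs.length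

-- termination helper for the DFS walk
lemma sizeOf_snd_lt_of_mem_toList : ∀ (ch : TrieL) (p : String × Trie), p ∈ ch.toList → sizeOf p.2 < sizeOf ch
  | .nil, p, h => by simp [TrieL.toList] at h
  | .cons k t ch, p, h => by
    simp only [TrieL.toList, List.mem_cons] at h
    rcases h with h | h
    · subst h; simp; omega
    · have := sizeOf_snd_lt_of_mem_toList ch p h; simp; omega

-- def _walk(node, prefix): emit joined prefix if a real note, then recurse over sorted children
def walk (keys : List String) : Trie → List String → List String → List String
  | .mk ch, pref, result =>
    let pathStr := PySem.Str.join " > " pref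
    let result1 := if keys.contains pathStr then result ++ [pathStr] else result
    (PySem.List.sorted ch.toList (fun p => p.1) false).attach.foldl
      (fun res p => walk keys p.1.2 (pref ++ [p.1.1]) res) result1
termination_by t _ _ => sizeOf t
decreasing_by
  have hm : p.1 ∈ TrieL.toList ch := (PySem.List.mem_sorted _ _ _ _).mp p.2
  have := sizeOf_snd_lt_of_mem_toList ch p.1 hm
  simp; omega

def depth_first_paths_py (notes : List (String × Int)) : List String :=
  let keys := notes.map (·.1)
  let tree := keys.foldl (fun t path => trieInsert t (segsOf path)) (Trie.mk .nil)
  (PySem.List.sorted tree.children.toList (fun p => p.1) false).attach.foldl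
    (fun res p => walk keys p.1.2 [p.1.1] res) []

-- ===== PORT B =====
def depth_first_paths_py_alt (notes : List (String × Int)) : List String :=
  let prefixes : PySem.Set (List String) :=
    notes.foldl (fun s kv =>
      let segments := segsOf kv.1
      (PySem.List.pyRange 1 (PySem.List.len segments + 1) 1).foldl (fun s i =>
        let p := PySem.List.slice segments none (some i)
        if (notes.map (·.1)).contains (PySem.Str.join " > " p) then PySem.Set.add s p else s) s)
      PySem.Set.empty
  (PySem.List.sorted prefixes (fun p => p) false).map (PySem.Str.join " > ")

-- ===== PRECONDITION & SPEC =====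
def Spec_depth_first_paths_py (notes : List (String × Int)) (out : List String) : Prop := out = depth_first_paths_py_alt notes
instance (notes : List (String × Int)) (out : List String) : Decidable (Spec_depth_first_paths_py notes out) := by unfold Spec_depth_first_paths_py; infer_instance

-- ===== CLAIM (what is proved, stated in full; the proofs are below) =====
def Claim_equal_depth_first_paths_py : Prop := ∀ (notes : List (String × Int)), Dom_depth_first_paths_py notes → Spec_depth_first_paths_py notes (depth_first_paths_py notes)


-- ===== LEMMAS AND PROOFS =====

-- abbreviations for the proofs
def js (p : List String) : String := PySem.Str.join " > " p
def qk (keys : List String) (p : List String) : Bool := keys.contains (js p)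

-- the nonempty prefixes of a segment list, shortest first
def prefs (segs : List String) : List (List String) :=
  (List.range segs.length).map (fun i => segs.take (i + 1))

lemma prefs_nil : prefs [] = [] := by simp [prefs]

lemma prefs_cons (s : String) (rest : List String) :
    prefs (s :: rest) = [s] :: (prefs rest).map (s :: ·) := by
  simp [prefs, List.range_succ_eq_map, List.map_map, Function.comp]

-- unsorted path lists of a trie (proof-side spec)
mutual
def Trie.paths : Trie → List (List String)
  | .mk ch => ch.pathsL
def TrieL.pathsL : TrieL → List (List String)
  | .nil => []
  | .cons k t ch => ([k] :: (Trie.paths t).map (k :: ·)) ++ ch.pathsL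
end

def TrieL.keysL : TrieL → List String
  | .nil => []
  | .cons k _ ch => k :: ch.keysL

lemma keysL_eq_map : ∀ (ch : TrieL), ch.keysL = ch.toList.map (·.1)
  | .nil => rfl
  | .cons k t ch => by simp [TrieL.keysL, TrieL.toList, keysL_eq_map ch]

-- well-formedness: distinct child names at every level
def TrieWF : Trie → Prop
  | .mk ch => ch.keysL.Nodup ∧ ∀ p : {x // x ∈ ch.toList}, TrieWF p.1.2
termination_by t => sizeOf t
decreasing_by
  have := sizeOf_snd_lt_of_mem_toList ch p.1 p.2
  simp; omega

lemma trieWF_iff (ch : TrieL) :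
    TrieWF (.mk ch) ↔ ch.keysL.Nodup ∧ ∀ p ∈ ch.toList, TrieWF p.2 := by
  rw [TrieWF]
  exact ⟨fun ⟨h1, h2⟩ => ⟨h1, fun p hp => h2 ⟨p, hp⟩⟩, fun ⟨h1, h2⟩ => ⟨h1, fun p => h2 p.1 p.2⟩⟩

lemma trieWF_empty : TrieWF (.mk .nil) := by
  rw [trieWF_iff]
  exact ⟨List.nodup_nil, by simp [TrieL.toList]⟩

lemma mem_pathsL : ∀ (ch : TrieL) (p : List String),
    p ∈ ch.pathsL ↔ ∃ e ∈ ch.toList, p = [e.1] ∨ ∃ x ∈ e.2.paths, p = e.1 :: x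
  | .nil, p => by simp [TrieL.pathsL, TrieL.toList]
  | .cons k t ch, p => by
    simp only [TrieL.pathsL, TrieL.toList, List.mem_append, List.mem_cons, List.mem_map,
      mem_pathsL ch p]
    constructor
    · rintro ((rfl | ⟨x, hx, rfl⟩) | ⟨e, he, h⟩)
      · exact ⟨(k, t), Or.inl rfl, Or.inl rfl⟩
      · exact ⟨(k, t), Or.inl rfl, Or.inr ⟨x, hx, rfl⟩⟩
      · exact ⟨e, Or.inr he, h⟩
    · rintro ⟨e, (rfl | he), h⟩
      · rcases h with rfl | ⟨x, hx, rfl⟩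
        · exact Or.inl (Or.inl rfl)
        · exact Or.inl (Or.inr ⟨x, hx, rfl⟩)
      · exact Or.inr ⟨e, he, h⟩

lemma mem_paths_ne_nil {t : Trie} {p : List String} (h : p ∈ t.paths) : p ≠ [] := by
  obtain ⟨ch⟩ := t
  rw [Trie.paths, mem_pathsL] at h
  obtain ⟨e, _, h⟩ := h
  rcases h with rfl | ⟨x, _, rfl⟩ <;> simp

-- what setWith does to the key list and the children
lemma keysL_setWith : ∀ (ch : TrieL) (s : String) (f : Option Trie → Trie),
    (setWith ch s f).keysL = if s ∈ ch.keysL then ch.keysL else ch.keysL ++ [s]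
  | .nil, s, f => by simp [setWith, TrieL.keysL]
  | .cons k t ch, s, f => by
    by_cases h : k = s
    · subst h
      simp [setWith, TrieL.keysL]
    · simp only [setWith, if_neg h, TrieL.keysL, keysL_setWith ch s f, List.mem_cons]
      have : ¬ s = k := fun hs => h hs.symm
      split_ifs with h1 h2 h3 <;> simp_all

lemma mem_toList_setWith : ∀ (ch : TrieL) (s : String) (f : Option Trie → Trie)
    (p : String × Trie), p ∈ (setWith ch s f).toList →
    p ∈ ch.toList ∨ p.2 = f none ∨ ∃ t0, (s, t0) ∈ ch.toList ∧ p.2 = f (some t0)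
  | .nil, s, f, p => by
    simp only [setWith, TrieL.toList, List.mem_cons, List.not_mem_nil, or_false]
    rintro rfl
    exact Or.inr (Or.inl rfl)
  | .cons k t ch, s, f, p => by
    rw [setWith]
    split_ifs with h
    · subst h
      intro hp
      simp only [TrieL.toList, List.mem_cons] at hp ⊢
      rcases hp with rfl | hp
      · exact Or.inr (Or.inr ⟨t, Or.inl rfl, rfl⟩)
      · exact Or.inl (Or.inr hp)
    · intro hp
      simp only [TrieL.toList, List.mem_cons] at hp ⊢
      rcases hp with rfl | hp
      · exact Or.inl (Or.inl rfl)
      · rcases mem_toList_setWith ch s f p hp with h1 | h1 | ⟨t0, h1, h2⟩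
        · exact Or.inl (Or.inr h1)
        · exact Or.inr (Or.inl h1)
        · exact Or.inr (Or.inr ⟨t0, Or.inr h1, h2⟩)

lemma mem_pathsL_setWith (f : Option Trie → Trie) (R : List (List String))
    (hf : ∀ o p, p ∈ (f o).paths ↔ p ∈ o.elim ([] : List (List String)) Trie.paths ∨ p ∈ R) :
    ∀ (ch : TrieL) (s : String) (p : List String),
      p ∈ (setWith ch s f).pathsL ↔ p ∈ ch.pathsL ∨ p = [s] ∨ ∃ x ∈ R, p = s :: x
  | .nil, s, p => by
    simp only [setWith, TrieL.pathsL, List.append_nil, List.mem_cons, List.mem_map, hf none,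
      Option.elim]
    simp only [List.not_mem_nil, false_or]
    tauto
  | .cons k t ch, s, p => by
    rw [setWith]
    split_ifs with h
    · subst h
      simp only [TrieL.pathsL, List.mem_append, List.mem_cons, List.mem_map, hf (some t),
        Option.elim]
      aesop
    · simp only [TrieL.pathsL, List.mem_append, List.mem_cons, List.mem_map,
        mem_pathsL_setWith f R hf ch s p]
      aesop

lemma mem_paths_trieInsert : ∀ (segs : List String) (t : Trie) (p : List String),
    p ∈ (trieInsert t segs).paths ↔ p ∈ t.paths ∨ p ∈ prefs segs := by
  intro segs
  induction segs with
  | nil => intro t p; simp [trieInsert, prefs_nil]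
  | cons s rest ih =>
    intro t p
    obtain ⟨ch⟩ := t
    rw [trieInsert]
    show p ∈ TrieL.pathsL _ ↔ p ∈ TrieL.pathsL ch ∨ _
    rw [mem_pathsL_setWith (fun o => trieInsert (o.getD (.mk .nil)) rest) (prefs rest)
      (fun o p => by
        rw [ih]
        cases o <;> simp [Option.elim, Trie.paths, TrieL.pathsL])]
    simp only [prefs_cons, List.mem_cons, List.mem_map]
    tauto

lemma trieWF_trieInsert : ∀ (segs : List String) (t : Trie), TrieWF t → TrieWF (trieInsert t segs) := by
  intro segs
  induction segs with
  | nil => intro t h; simpa [trieInsert] using h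
  | cons s rest ih =>
    rintro ⟨ch⟩ hwf
    rw [trieWF_iff] at hwf
    rw [trieInsert, trieWF_iff]
    constructor
    · rw [keysL_setWith]
      split_ifs with h
      · exact hwf.1
      · simp only [List.nodup_append, hwf.1, true_and]
        refine ⟨List.nodup_singleton s, ?_⟩
        intro a ha b hb
        simp only [List.mem_singleton] at hb
        subst hb
        exact fun hab => h (hab ▸ ha)
    · intro p hp
      rcases mem_toList_setWith _ _ _ _ hp with h1 | h1 | ⟨t0, h1, h2⟩
      · exact hwf.2 p h1
      · rw [h1]; exact ih _ trieWF_empty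
      · rw [h2]; exact ih _ (hwf.2 (s, t0) h1)

-- the tree built by the first loop
lemma mem_paths_build (keysList : List String) : ∀ (t0 : Trie) (p : List String),
    p ∈ (keysList.foldl (fun t k => trieInsert t (segsOf k)) t0).paths ↔
      p ∈ t0.paths ∨ ∃ k ∈ keysList, p ∈ prefs (segsOf k) := by
  induction keysList with
  | nil => simp
  | cons k ks ih =>
    intro t0 p
    simp only [List.foldl_cons, ih, mem_paths_trieInsert, List.mem_cons]
    aesop

lemma trieWF_build (keysList : List String) : ∀ (t0 : Trie), TrieWF t0 →
    TrieWF (keysList.foldl (fun t k => trieInsert t (segsOf k)) t0) := by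
  induction keysList with
  | nil => intro t0 h; exact h
  | cons k ks ih => intro t0 h; exact ih _ (trieWF_trieInsert _ _ h)

-- DFS path list (sorted children), mirroring walk's traversal order
def dfs : Trie → List (List String)
  | .mk ch =>
    (PySem.List.sorted ch.toList (fun p => p.1) false).attach.flatMap
      (fun p => [p.1.1] :: (dfs p.1.2).map (p.1.1 :: ·))
termination_by t => sizeOf t
decreasing_by
  have hm : p.1 ∈ TrieL.toList ch := (PySem.List.mem_sorted _ _ _ _).mp p.2
  have := sizeOf_snd_lt_of_mem_toList ch p.1 hm
  simp; omega

lemma dfs_eq (ch : TrieL) :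
    dfs (.mk ch) = (PySem.List.sorted ch.toList (fun p => p.1) false).flatMap
      (fun p => [p.1] :: (dfs p.2).map (p.1 :: ·)) := by
  rw [dfs]
  conv_rhs => rw [← List.attach_map_subtype_val (PySem.List.sorted ch.toList (fun p => p.1) false),
    List.flatMap_map]

lemma mem_dfs_iff : ∀ (n : Nat) (t : Trie), sizeOf t ≤ n → ∀ p, (p ∈ dfs t ↔ p ∈ t.paths) := by
  intro n
  induction n with
  | zero => rintro ⟨ch⟩ h; simp at h
  | succ n ih =>
    rintro ⟨ch⟩ h p
    rw [dfs_eq, Trie.paths, mem_pathsL]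
    simp only [List.mem_flatMap, PySem.List.mem_sorted, List.mem_cons, List.mem_map]
    constructor
    · rintro ⟨e, he, h1⟩
      have hs : sizeOf e.2 ≤ n := by
        have := sizeOf_snd_lt_of_mem_toList ch e he
        simp at h; omega
      rcases h1 with rfl | ⟨x, hx, rfl⟩
      · exact ⟨e, he, Or.inl rfl⟩
      · exact ⟨e, he, Or.inr ⟨x, (ih e.2 hs x).mp hx, rfl⟩⟩
    · rintro ⟨e, he, h1⟩
      have hs : sizeOf e.2 ≤ n := by
        have := sizeOf_snd_lt_of_mem_toList ch e he
        simp at h; omega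
      rcases h1 with rfl | ⟨x, hx, rfl⟩
      · exact ⟨e, he, Or.inl rfl⟩
      · exact ⟨e, he, Or.inr ⟨x, (ih e.2 hs x).mpr hx, rfl⟩⟩

-- instance bridge: the ports' sorted (default LT/DecidableLT) is the LinearOrder one
lemma sorted_bridge_str {α : Type} (xs : List α) (key : α → String) (rev : Bool) :
    PySem.List.sorted xs key rev =
      @PySem.List.sorted α String ((inferInstance : LinearOrder String).toLT)
        LinearOrder.toDecidableLT xs key rev :=
  congrArg (fun inst => @PySem.List.sorted α String (inferInstance : LT String) inst xs key rev)
    (Subsingleton.elim _ _)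

lemma sorted_bridge_list {α : Type} (xs : List α) (key : α → List String) (rev : Bool) :
    PySem.List.sorted xs key rev =
      @PySem.List.sorted α (List String) ((inferInstance : LinearOrder (List String)).toLT)
        LinearOrder.toDecidableLT xs key rev :=
  congrArg (fun inst => @PySem.List.sorted α (List String) List.instLT inst xs key rev)
    (Subsingleton.elim _ _)

lemma mem_block {k : String} {l : List (List String)} {p : List String}
    (h : p ∈ [k] :: l.map (k :: ·)) : ∃ xs, p = k :: xs := by
  simp only [List.mem_cons, List.mem_map] at h
  rcases h with rfl | ⟨x, _, rfl⟩
  · exact ⟨[], rfl⟩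
  · exact ⟨x, rfl⟩

lemma dfs_pairwise : ∀ (n : Nat) (t : Trie), sizeOf t ≤ n → TrieWF t →
    (dfs t).Pairwise (· < ·) := by
  intro n
  induction n with
  | zero => rintro ⟨ch⟩ h; simp at h
  | succ n ih =>
    rintro ⟨ch⟩ h hwf
    rw [trieWF_iff] at hwf
    rw [dfs_eq, List.pairwise_flatMap]
    have hsize : ∀ e ∈ PySem.List.sorted ch.toList (fun p => p.1) false, sizeOf e.2 ≤ n := by
      intro e he
      have := sizeOf_snd_lt_of_mem_toList ch e ((PySem.List.mem_sorted _ _ _ _).mp he)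
      simp at h; omega
    constructor
    · intro e he
      have hwe : TrieWF e.2 := hwf.2 e ((PySem.List.mem_sorted _ _ _ _).mp he)
      have hdp : (dfs e.2).Pairwise (· < ·) := ih e.2 (hsize e he) hwe
      rw [List.pairwise_cons]
      constructor
      · rintro p hp
        simp only [List.mem_map] at hp
        obtain ⟨x, hx, rfl⟩ := hp
        have hne : x ≠ [] :=
          mem_paths_ne_nil ((mem_dfs_iff n e.2 (hsize e he) x).mp hx)
        obtain ⟨y, ys, rfl⟩ := List.exists_cons_of_ne_nil hne
        exact List.Lex.cons List.Lex.nil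
      · rw [List.pairwise_map]
        exact hdp.imp (fun hab => List.Lex.cons hab)
    · -- across blocks: strictly increasing keys
      have hkey : (PySem.List.sorted ch.toList (fun p => p.1) false).Pairwise
          (fun a b => a.1 < b.1) := by
        have h1 : (PySem.List.sorted ch.toList (fun p => p.1) false).Pairwise
            (fun a b => a.1 ≤ b.1) := by
          rw [sorted_bridge_str]
          exact PySem.List.sorted_pairwise _ _
        have hnd : ((PySem.List.sorted ch.toList (fun p => p.1) false).map (·.1)).Nodup := by
          have hperm : ((PySem.List.sorted ch.toList (fun p => p.1) false).map (·.1)).Perm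
              (ch.toList.map (·.1)) :=
            (PySem.List.sorted_perm _ _ _).map _
          rw [← keysL_eq_map] at hperm
          exact hperm.nodup_iff.mpr hwf.1
        have h2 : (PySem.List.sorted ch.toList (fun p => p.1) false).Pairwise
            (fun a b => a.1 ≠ b.1) := by
          exact List.pairwise_map.mp hnd
        exact (h1.and h2).imp (fun ⟨hle, hne⟩ => lt_of_le_of_ne hle hne)
      refine hkey.imp ?_
      intro a b hab x hx y hy
      obtain ⟨xs, rfl⟩ := mem_block hx
      obtain ⟨ys, rfl⟩ := mem_block hy
      exact List.Lex.rel hab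

-- walk, characterized: emit the joined prefix, then the DFS paths below it, filtered by key membership
lemma walk_unfold (keys : List String) (ch : TrieL) (pref res : List String) :
    walk keys (.mk ch) pref res =
      (PySem.List.sorted ch.toList (fun p => p.1) false).foldl
        (fun res e => walk keys e.2 (pref ++ [e.1]) res)
        (if keys.contains (PySem.Str.join " > " pref) then res ++ [PySem.Str.join " > " pref]
         else res) := by
  rw [walk]
  exact List.foldl_attach (f := fun (res : List String) (e : String × Trie) => walk keys e.2 (pref ++ [e.1]) res)

lemma walk_foldl (keys : List String) (pf : String × Trie → List String) :
    ∀ (l : List (String × Trie)),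
      (∀ e ∈ l, ∀ pre res, walk keys e.2 pre res =
          res ++ ((pre :: (dfs e.2).map (pre ++ ·)).filter (qk keys)).map js) →
      ∀ res, l.foldl (fun res e => walk keys e.2 (pf e) res) res =
        res ++ ((l.flatMap (fun e => pf e :: (dfs e.2).map (pf e ++ ·))).filter (qk keys)).map js := by
  intro l
  induction l with
  | nil => intro _ res; simp
  | cons e l ih =>
    intro hl res
    simp only [List.foldl_cons, List.flatMap_cons, List.filter_append, List.map_append]
    rw [hl e (List.mem_cons_self ..), ih (fun e' he' => hl e' (List.mem_cons_of_mem _ he')),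
      List.append_assoc]

lemma walk_spec (keys : List String) : ∀ (n : Nat) (t : Trie), sizeOf t ≤ n → ∀ pre res,
    walk keys t pre res = res ++ ((pre :: (dfs t).map (pre ++ ·)).filter (qk keys)).map js := by
  intro n
  induction n with
  | zero => rintro ⟨ch⟩ h; simp at h
  | succ n ih =>
    rintro ⟨ch⟩ h pre res
    rw [walk_unfold,
      walk_foldl keys (fun e => pre ++ [e.1]) _
        (fun e he pre' res' => by
          have hs : sizeOf e.2 ≤ n := by
            have := sizeOf_snd_lt_of_mem_toList ch e ((PySem.List.mem_sorted _ _ _ _).mp he)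
            simp at h; omega
          exact ih e.2 hs pre' res'),
      dfs_eq, List.map_flatMap]
    have hcomp : ∀ (a : String × Trie),
        ((fun x => pre ++ x) ∘ fun x => a.1 :: x) = (fun x => pre ++ a.1 :: x) :=
      fun a => funext (fun x => rfl)
    by_cases hc : PySem.Str.join " > " pre ∈ keys <;>
      simp [qk, js, hc, List.contains_eq_mem, hcomp]

-- the top-level loop of port A on an arbitrary tree
lemma portA_top (keys : List String) (t : Trie) :
    (PySem.List.sorted t.children.toList (fun p => p.1) false).attach.foldl
      (fun res p => walk keys p.1.2 [p.1.1] res) ([] : List String) =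
      ((dfs t).filter (qk keys)).map js := by
  obtain ⟨ch⟩ := t
  refine Eq.trans (List.foldl_attach (f := fun (res : List String) (e : String × Trie) => walk keys e.2 [e.1] res)) ?_
  rw [walk_foldl keys (fun e => [e.1]) _
    (fun e he pre res => walk_spec keys (sizeOf e.2) e.2 le_rfl pre res)]
  rw [dfs_eq]
  simp only [List.singleton_append, List.nil_append, Trie.children]

lemma portA_eq (notes : List (String × Int)) :
    depth_first_paths_py notes =
      ((dfs ((notes.map (·.1)).foldl (fun t path => trieInsert t (segsOf path))
        (Trie.mk .nil))).filter (qk (notes.map (·.1)))).map js := by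
  simp only [depth_first_paths_py]
  exact portA_top _ _

lemma portB_eq (notes : List (String × Int)) :
    depth_first_paths_py_alt notes =
      (PySem.List.sorted (PySem.Set.ofList
        (((notes.map (·.1)).flatMap (fun k => prefs (segsOf k))).filter
          (qk (notes.map (·.1)))))
        (fun p => p) false).map js := by
  simp only [depth_first_paths_py_alt]
  congr 1
  have hinner : ∀ (segs : List String) (s : PySem.Set (List String)),
      (PySem.List.pyRange 1 (PySem.List.len segs + 1) 1).foldl
        (fun s i =>
          if (notes.map (·.1)).contains
              (PySem.Str.join " > " (PySem.List.slice segs none (some i))) then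
            PySem.Set.add s (PySem.List.slice segs none (some i))
          else s) s
      = (prefs segs).foldl
          (fun s p => if qk (notes.map (·.1)) p then PySem.Set.add s p else s) s := by
    intro segs s
    have hsl : ∀ k : Nat, PySem.List.slice segs none (some (1 + (k : Int))) = segs.take (k + 1) := by
      intro k
      have h1 : (1 + (k : Int)) = ((k + 1 : Nat) : Int) := by push_cast; ring
      rw [h1, PySem.List.slice_to_natCast]
    have hn : ((PySem.List.len segs + 1) - 1).toNat = segs.length := by
      rw [PySem.List.len_eq]; omega
    rw [PySem.List.pyRange_one, hn, List.foldl_map]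
    unfold prefs
    rw [List.foldl_map]
    simp only [hsl]
    rfl
  simp only [hinner]
  rw [PySem.Set.ofList_eq_foldl, ← PySem.List.foldl_if_eq_foldl_filter,
    List.foldl_flatMap, List.foldl_map]
  rfl

-- ===== VERDICT (by name: the statement is the Claim_ definition above) =====
theorem depth_first_paths_py_spec : Claim_equal_depth_first_paths_py := by
  intro notes _
  show depth_first_paths_py notes = depth_first_paths_py_alt notes
  rw [portA_eq, portB_eq]
  set keys := notes.map (·.1) with hk
  set T := keys.foldl (fun t path => trieInsert t (segsOf path)) (Trie.mk .nil) with hT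
  have hwf : TrieWF T := trieWF_build _ _ trieWF_empty
  have hpw : ((dfs T).filter (qk keys)).Pairwise (· < ·) :=
    (dfs_pairwise (sizeOf T) T le_rfl hwf).filter _
  have hnd1 : ((dfs T).filter (qk keys)).Nodup := hpw.imp (fun h => ne_of_lt h)
  have hmem : ∀ a, a ∈ (dfs T).filter (qk keys) ↔
      a ∈ PySem.Set.ofList ((keys.flatMap (fun k => prefs (segsOf k))).filter (qk keys)) := by
    intro a
    have h1 : ∀ p, p ∈ dfs T ↔ ∃ k ∈ keys, p ∈ prefs (segsOf k) := by
      intro p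
      rw [mem_dfs_iff (sizeOf T) T le_rfl, hT, mem_paths_build]
      simp [Trie.paths, TrieL.pathsL]
    simp only [List.mem_filter, PySem.Set.mem_ofList, h1, List.mem_flatMap]
  have hperm := (List.perm_ext_iff_of_nodup hnd1 (PySem.Set.nodup_ofList _)).mpr hmem
  congr 1
  rw [sorted_bridge_list]
  exact (PySem.List.sorted_eq_of_perm_of_pairwise_lt _ _ _ hperm hpw).symm
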